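-- pv_equiv track=rewrite | github.com/vschule/adventcode | adv_2016/day5_niceornaughty.py | isNice2
-- ===== SOURCE A (Python) =====
-- def isNice2(str_input):
--     maximum = str_input.__len__()
--     i = 2
--
--     bin_condition = False
--     repeat = False
--
--     while i < maximum:
--         binome = str_input[i-2:i]
--         rest = str_input[i:]
--
--         if binome in rest:
--             bin_condition = True
--
--         if str_input[i] == str_input[i-2]:
--             repeat = True
--         i += 1
--
--     return repeat and bin_condition
-- ===== SOURCE B (Python) =====
-- def isNice2(str_input):
--     n = len(str_input)
--     first = {}
--     pair_twice = False
--     repeat = False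
--     for j in range(n - 1):
--         p = str_input[j:j+2]
--         if p in first:
--             if first[p] <= j - 2:
--                 pair_twice = True
--         else:
--             first[p] = j
--         if j + 2 < n and str_input[j] == str_input[j + 2]:
--             repeat = True
--     return repeat and pair_twice
-- ===== Notes on version B (the rewrite author's own statement) =====
-- stated objective: faster
-- what changed: A re-slices the string and runs a substring search of the current pair over the whole remainder at every index; B makes a single left-to-right pass keeping a dict from each two-character pair to its first occurrence index, flagging a non-overlapping repeat when the current pair was first seen at least two positions earlier, and checks the spaced letter repeat in the same pass.
import Mathlib
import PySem

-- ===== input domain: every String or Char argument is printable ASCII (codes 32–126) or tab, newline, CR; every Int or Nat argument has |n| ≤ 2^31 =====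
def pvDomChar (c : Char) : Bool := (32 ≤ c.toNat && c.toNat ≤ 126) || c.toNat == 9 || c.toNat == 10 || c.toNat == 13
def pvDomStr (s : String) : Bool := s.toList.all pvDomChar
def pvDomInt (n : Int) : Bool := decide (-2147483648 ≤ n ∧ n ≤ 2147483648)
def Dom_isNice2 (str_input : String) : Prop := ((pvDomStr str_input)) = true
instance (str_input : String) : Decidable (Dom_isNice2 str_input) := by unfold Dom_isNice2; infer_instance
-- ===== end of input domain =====

-- B replaces A's quadratic per-index substring search ('binome in rest') by a single pass with a
-- dict of each pair's first occurrence index; return value only, no side effects.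

-- ===== PORT A =====
def isNice2Go (s : String) (maximum i : Nat) (bin rep : Bool) : Bool × Bool :=
  if i < maximum then
    let binome := PySem.Str.slice s (some ((i : Int) - 2)) (some (i : Int))
    let rest := PySem.Str.slice s (some (i : Int)) none
    let bin' := if PySem.Str.isIn binome rest then true else bin
    let rep' := if PySem.Str.pyGet? s (i : Int) = PySem.Str.pyGet? s ((i : Int) - 2) then true else rep
    isNice2Go s maximum (i + 1) bin' rep'
  else (bin, rep)
termination_by maximum - i

def isNice2 (str_input : String) : Bool :=
  let r := isNice2Go str_input (PySem.Str.len str_input).toNat 2 false false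
  r.2 && r.1

-- ===== PORT B =====
def isNice2AltStep (s : String) (n : Nat) (st : PySem.Dict String Int × Bool × Bool) (j : Int) :
    PySem.Dict String Int × Bool × Bool :=
  let p := PySem.Str.slice s (some j) (some (j + 2))
  let st1 :=
    match st.1.get? p with
    | some f => (st.1, if f ≤ j - 2 then true else st.2.1)
    | none => (st.1.insert p j, st.2.1)
  let rep := if (j + 2 < (n : Int) ∧ PySem.Str.pyGet? s j = PySem.Str.pyGet? s (j + 2)) then true else st.2.2
  (st1.1, st1.2, rep)

def isNice2_alt (str_input : String) : Bool :=
  let n := (PySem.Str.len str_input).toNat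
  let st := (PySem.List.pyRange 0 ((n : Int) - 1)).foldl (isNice2AltStep str_input n)
      (PySem.Dict.empty, false, false)
  st.2.2 && st.2.1

-- ===== PRECONDITION & SPEC =====
def Spec_isNice2 (str_input : String) (out : Bool) : Prop := out = isNice2_alt str_input
instance (str_input : String) (out : Bool) : Decidable (Spec_isNice2 str_input out) := by unfold Spec_isNice2; infer_instance

-- ===== CLAIM (what is proved, stated in full; the proofs are below) =====
def Claim_equal_isNice2 : Prop := ∀ (str_input : String), Dom_isNice2 str_input → Spec_isNice2 str_input (isNice2 str_input)

-- ===== LEMMAS AND PROOFS =====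

-- the pair of characters starting at index j
def pvPr (cs : List Char) (j : Nat) : List Char := (cs.drop j).take 2

-- "some pair occurs again later without overlapping"
def pvPairProp (cs : List Char) : Prop := ∃ j k : Nat, j + 2 ≤ k ∧ k + 1 < cs.length ∧ pvPr cs j = pvPr cs k

-- "some letter repeats with exactly one letter between"
def pvRepProp (cs : List Char) : Prop := ∃ i : Nat, i + 2 < cs.length ∧ cs[i]? = cs[i + 2]?

def pvBinFrom (cs : List Char) (i : Nat) : Prop :=
  ∃ m : Nat, i ≤ m ∧ m < cs.length ∧ ∃ d : Nat, pvPr cs (m - 2) = pvPr cs (m + d)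

def pvRepFrom (cs : List Char) (i : Nat) : Prop :=
  ∃ m : Nat, i ≤ m ∧ m < cs.length ∧ cs[m]? = cs[m - 2]?

lemma pvPr_length (cs : List Char) (j : Nat) : (pvPr cs j).length = min 2 (cs.length - j) := by
  simp [pvPr]

lemma pvQbin_iff (s : String) (i : Nat) (h2 : 2 ≤ i) (hi : i < s.toList.length) :
    PySem.Str.isIn (PySem.Str.slice s (some ((i : Int) - 2)) (some (i : Int)))
        (PySem.Str.slice s (some (i : Int)) none) = true
      ↔ ∃ d : Nat, pvPr s.toList (i - 2) = pvPr s.toList (i + d) := by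
  have hc : ((i : Int) - 2) = ((i - 2 : Nat) : Int) := by omega
  rw [PySem.Str.isIn_eq, PySem.Str.toList_slice, PySem.Str.toList_slice,
    PySem.Chars.slice_eq_listSlice, PySem.Chars.slice_eq_listSlice,
    PySem.List.slice_from s.toList (a := (i : Int)) (by positivity), Int.toNat_natCast, hc]
  have h2' : (i : Int) = ((i - 2 : Nat) : Int) + ((2 : Nat) : Int) := by omega
  rw [h2', PySem.List.slice_natCast_add]
  rw [← PySem.Chars.exists_prefix_drop_iff_isIn]
  have hlen : (List.take 2 (List.drop (i - 2) s.toList)).length = 2 := by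
    simp only [List.length_take, List.length_drop]; omega
  constructor
  · rintro ⟨j, hj⟩
    refine ⟨j, ?_⟩
    rw [List.prefix_iff_eq_take] at hj
    rw [List.drop_drop, hlen] at hj
    simpa [pvPr, Int.toNat_natCast, Nat.add_comm] using hj
  · rintro ⟨d, hd⟩
    refine ⟨d, ?_⟩
    rw [List.prefix_iff_eq_take, List.drop_drop, hlen]
    simpa [pvPr, Int.toNat_natCast, Nat.add_comm] using hd

lemma pvQrep_iff (s : String) (i : Nat) (h2 : 2 ≤ i) :
    (PySem.Str.pyGet? s (i : Int) = PySem.Str.pyGet? s ((i : Int) - 2))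
      ↔ s.toList[i]? = s.toList[i - 2]? := by
  have hc : ((i : Int) - 2) = ((i - 2 : Nat) : Int) := by omega
  rw [hc, PySem.Str.pyGet?_natCast, PySem.Str.pyGet?_natCast]

lemma pvBinFrom_step (cs : List Char) (i : Nat) :
    pvBinFrom cs i ↔ ((i < cs.length ∧ ∃ d : Nat, pvPr cs (i - 2) = pvPr cs (i + d)) ∨ pvBinFrom cs (i + 1)) := by
  constructor
  · rintro ⟨m, him, hmn, hd⟩
    rcases Nat.eq_or_lt_of_le him with h | h
    · exact Or.inl (by subst h; exact ⟨hmn, hd⟩)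
    · exact Or.inr ⟨m, h, hmn, hd⟩
  · rintro (⟨hin, hd⟩ | ⟨m, him, hmn, hd⟩)
    · exact ⟨i, le_refl i, hin, hd⟩
    · exact ⟨m, by omega, hmn, hd⟩

lemma pvRepFrom_step (cs : List Char) (i : Nat) :
    pvRepFrom cs i ↔ ((i < cs.length ∧ cs[i]? = cs[i - 2]?) ∨ pvRepFrom cs (i + 1)) := by
  constructor
  · rintro ⟨m, him, hmn, hd⟩
    rcases Nat.eq_or_lt_of_le him with h | h
    · exact Or.inl (by subst h; exact ⟨hmn, hd⟩)
    · exact Or.inr ⟨m, h, hmn, hd⟩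
  · rintro (⟨hin, hd⟩ | ⟨m, him, hmn, hd⟩)
    · exact ⟨i, le_refl i, hin, hd⟩
    · exact ⟨m, by omega, hmn, hd⟩

lemma pvBinFrom_end (cs : List Char) (i : Nat) (h : ¬ i < cs.length) : ¬ pvBinFrom cs i := by
  rintro ⟨m, him, hmn, -⟩; omega

lemma pvRepFrom_end (cs : List Char) (i : Nat) (h : ¬ i < cs.length) : ¬ pvRepFrom cs i := by
  rintro ⟨m, him, hmn, -⟩; omega

set_option maxHeartbeats 1600000 in
lemma goA_spec (s : String) : ∀ d i bin rep, 2 ≤ i → (PySem.Str.len s).toNat - i = d →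
    ((isNice2Go s (PySem.Str.len s).toNat i bin rep).1 = true ↔ (bin = true ∨ pvBinFrom s.toList i)) ∧
    ((isNice2Go s (PySem.Str.len s).toNat i bin rep).2 = true ↔ (rep = true ∨ pvRepFrom s.toList i)) := by
  have hlen : (PySem.Str.len s).toNat = s.toList.length := by
    rw [PySem.Str.len_eq, Int.toNat_natCast]
  intro d
  induction d with
  | zero =>
    intro i bin rep h2 hd
    have hge : ¬ i < (PySem.Str.len s).toNat := by omega
    rw [isNice2Go, if_neg hge]
    rw [hlen] at hge
    simp [pvBinFrom_end s.toList i hge, pvRepFrom_end s.toList i hge]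
  | succ d ih =>
    intro i bin rep h2 hd
    have hlt : i < (PySem.Str.len s).toNat := by omega
    have hlt' : i < s.toList.length := by omega
    rw [isNice2Go, if_pos hlt]
    dsimp only
    have key := ih (i + 1)
      (if PySem.Str.isIn (PySem.Str.slice s (some ((i : Int) - 2)) (some (i : Int)))
          (PySem.Str.slice s (some (i : Int)) none) then true else bin)
      (if PySem.Str.pyGet? s (i : Int) = PySem.Str.pyGet? s ((i : Int) - 2) then true else rep)
      (by omega) (by omega)
    refine ⟨?_, ?_⟩
    · rw [key.1, pvBinFrom_step s.toList i]
      by_cases hq : PySem.Str.isIn (PySem.Str.slice s (some ((i : Int) - 2)) (some (i : Int)))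
          (PySem.Str.slice s (some (i : Int)) none) = true
      · have hb : i < s.toList.length ∧ ∃ d : Nat, pvPr s.toList (i - 2) = pvPr s.toList (i + d) :=
          ⟨hlt', (pvQbin_iff s i h2 hlt').mp hq⟩
        rw [if_pos hq]
        constructor
        · rintro (- | h); exact Or.inr (Or.inl hb); exact Or.inr (Or.inr h)
        · intro _; exact Or.inl rfl
      · have hnq : ¬ (i < s.toList.length ∧ ∃ d : Nat, pvPr s.toList (i - 2) = pvPr s.toList (i + d)) := by
          rintro ⟨-, hd'⟩
          exact hq ((pvQbin_iff s i h2 hlt').mpr hd')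
        rw [if_neg hq]
        constructor
        · rintro (h | h); exact Or.inl h; exact Or.inr (Or.inr h)
        · rintro (h | h | h); exact Or.inl h; exact absurd h hnq; exact Or.inr h
    · rw [key.2, pvRepFrom_step s.toList i]
      by_cases hq : PySem.Str.pyGet? s (i : Int) = PySem.Str.pyGet? s ((i : Int) - 2)
      · have hb : i < s.toList.length ∧ s.toList[i]? = s.toList[i - 2]? :=
          ⟨hlt', (pvQrep_iff s i h2).mp hq⟩
        rw [if_pos hq]
        constructor
        · rintro (- | h); exact Or.inr (Or.inl hb); exact Or.inr (Or.inr h)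
        · intro _; exact Or.inl rfl
      · have hnq : ¬ (i < s.toList.length ∧ s.toList[i]? = s.toList[i - 2]?) := by
          rintro ⟨-, hd'⟩
          exact hq ((pvQrep_iff s i h2).mpr hd')
        rw [if_neg hq]
        constructor
        · rintro (h | h); exact Or.inl h; exact Or.inr (Or.inr h)
        · rintro (h | h | h); exact Or.inl h; exact absurd h hnq; exact Or.inr h

lemma pvBinFrom_two (cs : List Char) : pvBinFrom cs 2 ↔ pvPairProp cs := by
  constructor
  · rintro ⟨m, h2m, hmn, d, he⟩
    refine ⟨m - 2, m + d, by omega, ?_, he⟩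
    have h1 : (pvPr cs (m - 2)).length = 2 := by rw [pvPr_length]; omega
    have h2 : (pvPr cs (m + d)).length = 2 := by rw [← he]; exact h1
    rw [pvPr_length] at h2
    omega
  · rintro ⟨j, k, hjk, hkn, he⟩
    refine ⟨j + 2, by omega, by omega, k - (j + 2), ?_⟩
    have h1 : j + 2 - 2 = j := by omega
    have h2 : j + 2 + (k - (j + 2)) = k := by omega
    rw [h1, h2]; exact he

lemma pvRepFrom_two (cs : List Char) : pvRepFrom cs 2 ↔ pvRepProp cs := by
  constructor
  · rintro ⟨m, h2m, hmn, he⟩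
    refine ⟨m - 2, by omega, ?_⟩
    have h1 : m - 2 + 2 = m := by omega
    rw [h1]; exact he.symm
  · rintro ⟨i, hin, he⟩
    refine ⟨i + 2, by omega, by omega, ?_⟩
    have h1 : i + 2 - 2 = i := by omega
    rw [h1]; exact he.symm

lemma isNice2_iff (s : String) :
    isNice2 s = true ↔ pvRepProp s.toList ∧ pvPairProp s.toList := by
  have h := goA_spec s ((PySem.Str.len s).toNat - 2) 2 false false (le_refl 2) rfl
  unfold isNice2
  rw [Bool.and_eq_true, h.1, h.2]
  simp [pvBinFrom_two, pvRepFrom_two]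


-- the pair of characters starting at index j
-- B side -----------------------------------------------------------------

def pvPairS (s : String) (m : Nat) : String :=
  PySem.Str.slice s (some (m : Int)) (some ((m : Int) + 2))

lemma pvPairS_toList (s : String) (m : Nat) : (pvPairS s m).toList = pvPr s.toList m := by
  have h2 : ((m : Int) + 2) = ((m : Int) + ((2 : Nat) : Int)) := by norm_num
  rw [pvPairS, PySem.Str.toList_slice, PySem.Chars.slice_eq_listSlice, h2,
    PySem.List.slice_natCast_add, pvPr]

lemma pvPairS_inj (s : String) {m m' : Nat} (h : pvPr s.toList m = pvPr s.toList m') :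
    pvPairS s m = pvPairS s m' := by
  apply String.toList_inj.mp
  rw [pvPairS_toList, pvPairS_toList, h]

def pvStB (s : String) (n t : Nat) : PySem.Dict String Int × Bool × Bool :=
  (PySem.List.pyRange 0 (t : Int)).foldl (isNice2AltStep s n) (PySem.Dict.empty, false, false)

lemma pvStB_succ (s : String) (n t : Nat) :
    pvStB s n (t + 1) = isNice2AltStep s n (pvStB s n t) (t : Int) := by
  rw [pvStB, pvStB, PySem.List.pyRange_zero_natCast, PySem.List.pyRange_zero_natCast,
    List.range_succ, List.map_append, List.foldl_append]
  rfl

lemma pvGuard_iff (s : String) (n t : Nat) (hn : n = s.toList.length) :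
    (((t : Int) + 2 < (n : Int) ∧ PySem.Str.pyGet? s (t : Int) = PySem.Str.pyGet? s ((t : Int) + 2)))
      ↔ (t + 2 < s.toList.length ∧ s.toList[t]? = s.toList[t + 2]?) := by
  have hc : ((t : Int) + 2) = ((t + 2 : Nat) : Int) := by push_cast; ring
  rw [hc, PySem.Str.pyGet?_natCast, PySem.Str.pyGet?_natCast, hn]
  constructor
  · rintro ⟨h1, h2⟩; exact ⟨by exact_mod_cast h1, h2⟩
  · rintro ⟨h1, h2⟩; exact ⟨by exact_mod_cast h1, h2⟩

lemma pvInvB (s : String) (n : Nat) (hn : n = s.toList.length) :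
    ∀ t, t + 1 ≤ s.toList.length →
    (∀ (q : String) (f : Int), (pvStB s n t).1.get? q = some f →
        ∃ m : Nat, f = (m : Int) ∧ m < t ∧ pvPr s.toList m = q.toList ∧
          ∀ m' < m, pvPr s.toList m' ≠ q.toList) ∧
    (∀ m : Nat, m < t → ((pvStB s n t).1.get? (pvPairS s m)).isSome = true) ∧
    ((pvStB s n t).2.1 = true ↔
        ∃ j k : Nat, k < t ∧ j + 2 ≤ k ∧ pvPr s.toList j = pvPr s.toList k) ∧
    ((pvStB s n t).2.2 = true ↔
        ∃ i : Nat, i < t ∧ i + 2 < s.toList.length ∧ s.toList[i]? = s.toList[i + 2]?) := by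
  intro t
  induction t with
  | zero =>
    intro _
    refine ⟨?_, ?_, ?_, ?_⟩
    · intro q f hq
      rw [show pvStB s n 0 = (PySem.Dict.empty, false, false) from rfl] at hq
      rw [PySem.Dict.get?_empty] at hq
      exact absurd hq (by simp)
    · intro m hm; omega
    · rw [show pvStB s n 0 = (PySem.Dict.empty, false, false) from rfl]
      simp
    · rw [show pvStB s n 0 = (PySem.Dict.empty, false, false) from rfl]
      simp
  | succ t ih =>
    intro ht
    obtain ⟨ih1, ih2, ih3, ih4⟩ := ih (by omega)
    rw [pvStB_succ]
    rw [isNice2AltStep]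
    dsimp only
    -- the rep component first: it does not depend on the dict match
    have hrep :
        ((if ((t : Int) + 2 < (n : Int) ∧
              PySem.Str.pyGet? s (t : Int) = PySem.Str.pyGet? s ((t : Int) + 2)) then true
          else (pvStB s n t).2.2) = true ↔
          ∃ i : Nat, i < t + 1 ∧ i + 2 < s.toList.length ∧ s.toList[i]? = s.toList[i + 2]?) := by
      by_cases hg : ((t : Int) + 2 < (n : Int) ∧
          PySem.Str.pyGet? s (t : Int) = PySem.Str.pyGet? s ((t : Int) + 2))
      · rw [if_pos hg]
        have hg' := (pvGuard_iff s n t hn).mp hg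
        constructor
        · intro _; exact ⟨t, by omega, hg'.1, hg'.2⟩
        · intro _; rfl
      · rw [if_neg hg, ih4]
        constructor
        · rintro ⟨i, hi, h2, he⟩; exact ⟨i, by omega, h2, he⟩
        · rintro ⟨i, hi, h2, he⟩
          rcases Nat.lt_succ_iff_lt_or_eq.mp hi with h | h
          · exact ⟨i, h, h2, he⟩
          · subst h
            exact absurd ((pvGuard_iff s n i hn).mpr ⟨h2, he⟩) hg
    rcases hget : (pvStB s n t).1.get? (PySem.Str.slice s (some (t : Int)) (some ((t : Int) + 2)))
      with _ | f
    · -- pair not seen before: insert, twice unchanged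
      dsimp only
      have hget' : (pvStB s n t).1.get? (pvPairS s t) = none := hget
      have hnone : ∀ m' < t, pvPr s.toList m' ≠ pvPr s.toList t := by
        intro m' hm' he
        have h2 := ih2 m' hm'
        rw [pvPairS_inj s he, hget'] at h2
        simp at h2
      refine ⟨?_, ?_, ?_, hrep⟩
      · intro q f hq
        by_cases hqp : q = pvPairS s t
        · subst hqp
          rw [show PySem.Str.slice s (some (t : Int)) (some ((t : Int) + 2)) = pvPairS s t from rfl,
            PySem.Dict.get?_insert_self] at hq
          have hf : f = (t : Int) := by simpa using hq.symm
          refine ⟨t, hf, by omega, ?_, ?_⟩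
          · rw [pvPairS_toList]
          · intro m' hm' he
            rw [pvPairS_toList] at he
            exact hnone m' hm' he
        · rw [show PySem.Str.slice s (some (t : Int)) (some ((t : Int) + 2)) = pvPairS s t from rfl,
            PySem.Dict.get?_insert_of_ne _ _ hqp] at hq
          obtain ⟨m, hf, hm, hpr, hmin⟩ := ih1 q f hq
          exact ⟨m, hf, by omega, hpr, hmin⟩
      · intro m hm
        rw [show PySem.Str.slice s (some (t : Int)) (some ((t : Int) + 2)) = pvPairS s t from rfl]
        by_cases hmp : pvPairS s m = pvPairS s t
        · rw [hmp, PySem.Dict.get?_insert_self]; rfl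
        · rw [PySem.Dict.get?_insert_of_ne _ _ hmp]
          rcases Nat.lt_succ_iff_lt_or_eq.mp hm with h | h
          · exact ih2 m h
          · exact absurd (h ▸ rfl) hmp
      · rw [ih3]
        constructor
        · rintro ⟨j, k, hk, hjk, he⟩; exact ⟨j, k, by omega, hjk, he⟩
        · rintro ⟨j, k, hk, hjk, he⟩
          rcases Nat.lt_succ_iff_lt_or_eq.mp hk with h | h
          · exact ⟨j, k, h, hjk, he⟩
          · subst h
            exact absurd he (hnone j (by omega))
    · -- pair seen before at its first occurrence f
      dsimp only
      have hget' : (pvStB s n t).1.get? (pvPairS s t) = some f := hget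
      obtain ⟨m, hf, hm, hpr, hmin⟩ := ih1 _ f hget'
      rw [pvPairS_toList] at hpr hmin
      refine ⟨?_, ?_, ?_, hrep⟩
      · intro q f' hq
        obtain ⟨m1, h1, h2, h3, h4⟩ := ih1 q f' hq
        exact ⟨m1, h1, by omega, h3, h4⟩
      · intro m' hm'
        rcases Nat.lt_succ_iff_lt_or_eq.mp hm' with h | h
        · exact ih2 m' h
        · subst h
          rw [hget']
          rfl
      · by_cases hle : f ≤ (t : Int) - 2
        · rw [if_pos hle]
          constructor
          · intro _
            exact ⟨m, t, by omega, by omega, hpr⟩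
          · intro _; rfl
        · rw [if_neg hle, ih3]
          constructor
          · rintro ⟨j, k, hk, hjk, he⟩; exact ⟨j, k, by omega, hjk, he⟩
          · rintro ⟨j, k, hk, hjk, he⟩
            rcases Nat.lt_succ_iff_lt_or_eq.mp hk with h | h
            · exact ⟨j, k, h, hjk, he⟩
            · subst h
              have hjm : m ≤ j := by
                by_contra hlt
                exact hmin j (by omega) he
              omega
  -- end of induction

lemma isNice2_alt_iff (s : String) :
    isNice2_alt s = true ↔ pvRepProp s.toList ∧ pvPairProp s.toList := by
  have hlen : (PySem.Str.len s).toNat = s.toList.length := by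
    rw [PySem.Str.len_eq, Int.toNat_natCast]
  unfold isNice2_alt
  dsimp only
  by_cases hz : s.toList.length = 0
  · rw [hlen, hz]
    rw [show (((0 : Nat) : Int) - 1) = (-1 : Int) from by norm_num]
    rw [show PySem.List.pyRange 0 (-1) = ([] : List Int) from rfl]
    rw [show ((([] : List Int).foldl (isNice2AltStep s 0) (PySem.Dict.empty, false, false))) =
      ((PySem.Dict.empty : PySem.Dict String Int), false, false) from rfl]
    constructor
    · intro h; exact absurd h (by simp)
    · rintro ⟨⟨i, hi, -⟩, -⟩; omega
  · have h1 : 1 ≤ s.toList.length := by omega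
    rw [hlen]
    have hc : ((s.toList.length : Int) - 1) = ((s.toList.length - 1 : Nat) : Int) := by omega
    rw [hc]
    have hfold : List.foldl (isNice2AltStep s s.toList.length) (PySem.Dict.empty, false, false)
        (PySem.List.pyRange 0 ((s.toList.length - 1 : Nat) : Int))
        = pvStB s s.toList.length (s.toList.length - 1) := rfl
    rw [hfold]
    obtain ⟨-, -, h3, h4⟩ := pvInvB s s.toList.length rfl (s.toList.length - 1) (by omega)
    rw [Bool.and_eq_true, h3, h4]
    constructor
    · rintro ⟨⟨i, hi, h2, he⟩, ⟨j, k, hk, hjk, he'⟩⟩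
      exact ⟨⟨i, h2, he⟩, ⟨j, k, hjk, by omega, he'⟩⟩
    · rintro ⟨⟨i, h2, he⟩, ⟨j, k, hjk, hk, he'⟩⟩
      exact ⟨⟨i, by omega, h2, he⟩, ⟨j, k, by omega, hjk, he'⟩⟩

-- ===== VERDICT (by name: the statement is the Claim_ definition above) =====
theorem isNice2_spec : Claim_equal_isNice2 := by
  intro s _
  unfold Spec_isNice2
  rw [Bool.eq_iff_iff, isNice2_iff, isNice2_alt_iff]
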